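-- pv_equiv track=rewrite | github.com/LPRowe/coding-interview-practice | arcade/the-core/medium/squareDigitsSequence.py | squareDigitsSequence
-- ===== SOURCE A (Python) =====
-- def squareDigitsSequence(a0):
--     elements=[a0]
--     a=a0
--     while True:
--         a=sum([int(i)**2 for i in str(a)])
--         elements.append(a)
--         if elements.count(a)>1:
--             break
--
--     return len(elements)
-- ===== SOURCE B (Python) =====
-- def squareDigitsSequence(a0):
--     # Every squared-digit-sum orbit ends in one of the two fixed points or in the
--     # classic eight-cycle; so the first repeat happens exactly one full cycle after
--     # the orbit first touches this attractor set.
--     ATTRACTOR = {0, 1, 4, 16, 37, 58, 89, 145, 42, 20}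
--     a = a0
--     mu = 0  # steps until the orbit first hits the attractor
--     while a not in ATTRACTOR:
--         a = sum(int(c) ** 2 for c in str(a))
--         mu += 1
--     lam = 1 if a in (0, 1) else 8  # cycle length at the entry point
--     return mu + lam + 1
-- ===== Notes on version B (the rewrite author's own statement) =====
-- stated objective: alternative
-- what changed: B drops the growing list that A re-scans with list.count each step and instead walks the orbit in constant space, counting the steps until it first touches the squared-digit-sum map's known attractor (its two fixed points plus its classic eight-cycle), then returns that step count plus the cycle length plus one, which equals A's list length at the first repeat.
import Mathlib
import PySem

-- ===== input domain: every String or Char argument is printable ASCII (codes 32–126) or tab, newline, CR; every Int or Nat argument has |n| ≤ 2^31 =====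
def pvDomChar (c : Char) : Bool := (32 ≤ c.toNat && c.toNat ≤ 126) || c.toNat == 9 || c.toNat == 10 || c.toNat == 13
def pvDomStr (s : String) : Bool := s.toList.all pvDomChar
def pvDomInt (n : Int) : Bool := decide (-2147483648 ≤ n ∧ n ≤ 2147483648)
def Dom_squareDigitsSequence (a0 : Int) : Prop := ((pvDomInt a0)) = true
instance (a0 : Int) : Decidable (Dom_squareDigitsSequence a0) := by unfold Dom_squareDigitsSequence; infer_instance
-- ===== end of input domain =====

-- B replaces A's grow-and-rescan list by a constant-space walk counting steps to the known
-- attractor of the squared-digit-sum map (its two fixed points and its classic eight-cycle),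
-- returning mu + lambda + 1; return value identical on all admitted inputs.

-- shared digit-step: a = sum(int(i)**2 for i in str(a)) (both Pythons contain this expression verbatim)
def sqsum (a : Int) : Int :=
  ((PySem.Int.toChars a).map (fun c => ((PySem.Int.ofChars? [c]).getD 0) ^ 2)).sum

-- ===== PORT A =====
-- while True loop with fuel (totality guard only; ≤ 21 iterations occur on the admitted domain)
def loopA (elements : List Int) (a : Int) : Nat → Int
  | 0 => (elements.length : Int)
  | fuel+1 =>
    let a' := sqsum a
    let elements' := elements ++ [a']
    if PySem.List.count elements' a' > 1 then (elements'.length : Int)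
    else loopA elements' a' fuel

def squareDigitsSequence (a0 : Int) : Int := loopA [a0] a0 64

-- ===== PORT B =====
def ATTR : PySem.Set Int := PySem.Set.ofList [0, 1, 4, 16, 37, 58, 89, 145, 42, 20]

-- while a not in ATTRACTOR: a = sqsum a; mu += 1   (fuel = totality guard only)
def loopB (a : Int) (mu : Int) : Nat → Int × Int
  | 0 => (a, mu)
  | fuel+1 =>
    if PySem.Set.contains ATTR a then (a, mu)
    else loopB (sqsum a) (mu + 1) fuel

def squareDigitsSequence_alt (a0 : Int) : Int :=
  let p := loopB a0 0 64
  p.2 + (if p.1 = 0 ∨ p.1 = 1 then 1 else 8) + 1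

-- ===== PRECONDITION & SPEC =====
-- Pre_ excludes negative a0, on which BOTH Pythons raise ValueError (int('-') on the sign char)
def Pre_squareDigitsSequence (a0 : Int) : Prop := 0 ≤ a0
instance (a0 : Int) : Decidable (Pre_squareDigitsSequence a0) := by unfold Pre_squareDigitsSequence; infer_instance
def pvWitness_squareDigitsSequence : Int := (19)

def Spec_squareDigitsSequence (a0 : Int) (out : Int) : Prop := out = squareDigitsSequence_alt a0
instance (a0 : Int) (out : Int) : Decidable (Spec_squareDigitsSequence a0 out) := by unfold Spec_squareDigitsSequence; infer_instance

-- ===== CLAIM (what is proved, stated in full; the proofs are below) =====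
def Claim_equal_squareDigitsSequence : Prop := ∀ (a0 : Int), Dom_squareDigitsSequence a0 → Pre_squareDigitsSequence a0 → Spec_squareDigitsSequence a0 (squareDigitsSequence a0)

-- ===== LEMMAS AND PROOFS =====

-- fast arithmetic mirror of sqsum, used only inside the proofs (kernel-friendly)
def ssdF : Nat → Nat → Nat
  | 0, _ => 0
  | g+1, n => if n < 10 then n * n else (n % 10) * (n % 10) + ssdF g (n / 10)

def sqsumF (a : Int) : Int := (ssdF (a.toNat + 1) a.toNat : Int)

def loopAF (elements : List Int) (a : Int) : Nat → Int
  | 0 => (elements.length : Int)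
  | fuel+1 =>
    let a' := sqsumF a
    let elements' := elements ++ [a']
    if PySem.List.count elements' a' > 1 then (elements'.length : Int)
    else loopAF elements' a' fuel

def loopBF (a : Int) (mu : Int) : Nat → Int × Int
  | 0 => (a, mu)
  | fuel+1 =>
    if PySem.Set.contains ATTR a then (a, mu)
    else loopBF (sqsumF a) (mu + 1) fuel

theorem val_digitChar (d : Nat) (hd : d < 10) :
    (PySem.Int.ofChars? [Nat.digitChar d]).getD 0 = (d : Int) := by
  interval_cases d <;> decide

theorem core_sum (f : Nat) : ∀ (g n : Nat) (l : List Char), n < f → n < 10 ^ g →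
    ((Nat.toDigitsCore 10 f n l).map (fun c => ((PySem.Int.ofChars? [c]).getD 0) ^ 2)).sum
      = (ssdF g n : Int)
        + (l.map (fun c => ((PySem.Int.ofChars? [c]).getD 0) ^ 2)).sum := by
  induction f with
  | zero => intro g n l hf _; exact absurd hf (Nat.not_lt_zero n)
  | succ f ih =>
    intro g n l hf hg
    show ((Nat.toDigitsCore 10 (f+1) n l).map _).sum = _
    rw [Nat.toDigitsCore]
    by_cases h0 : n / 10 = 0
    · have hn10 : n < 10 := by omega
      rw [if_pos h0]
      have hssd : ssdF g n = n * n := by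
        cases g with
        | zero =>
          simp only [pow_zero, Nat.lt_one_iff] at hg
          subst hg; simp [ssdF]
        | succ g => simp [ssdF, hn10]
      simp only [List.map_cons, List.sum_cons, hssd]
      rw [Nat.mod_eq_of_lt hn10, val_digitChar n hn10]
      push_cast
      try ring
    · rw [if_neg h0]
      have hn10 : 10 ≤ n := by omega
      cases g with
      | zero =>
        simp only [pow_zero, Nat.lt_one_iff] at hg
        omega
      | succ g =>
        have hdiv : n / 10 < 10 ^ g := by
          rw [Nat.div_lt_iff_lt_mul (by norm_num)]
          calc n < 10 ^ (g+1) := hg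
            _ = 10 ^ g * 10 := by ring
        rw [ih g (n / 10) _ (by omega) hdiv]
        have : ssdF (g+1) n = (n % 10) * (n % 10) + ssdF g (n / 10) := by
          simp [ssdF]; omega
        rw [this]
        simp only [List.map_cons, List.sum_cons]
        rw [val_digitChar (n % 10) (Nat.mod_lt _ (by norm_num))]
        push_cast
        try ring

theorem sqsum_eqF (a : Int) (h : 0 ≤ a) : sqsum a = sqsumF a := by
  unfold sqsum sqsumF PySem.Int.toChars
  rw [if_neg (by omega), Nat.toDigits]
  rw [core_sum (a.toNat + 1) (a.toNat + 1) a.toNat [] (by omega)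
    (lt_of_lt_of_le (Nat.lt_pow_self (by norm_num)) (Nat.pow_le_pow_right (by norm_num) (by omega)))]
  simp

theorem sqsumF_nonneg (a : Int) : 0 ≤ sqsumF a := by
  unfold sqsumF; positivity

theorem ssdF_le (g : Nat) : ∀ (k n : Nat), 1 ≤ k → n < 10 ^ k → ssdF g n ≤ 81 * k := by
  induction g with
  | zero => intro k n _ _; simp [ssdF]
  | succ g ih =>
    intro k n hk hn
    by_cases h10 : n < 10
    · simp only [ssdF, if_pos h10]
      nlinarith
    · simp only [ssdF, if_neg h10]
      obtain ⟨m, rfl⟩ : ∃ m, k = m + 1 := ⟨k - 1, by omega⟩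
      have hm1 : 1 ≤ m := by
        by_contra hc
        have : m = 0 := by omega
        subst this; simp at hn; omega
      have hdiv : n / 10 < 10 ^ m := by
        rw [Nat.div_lt_iff_lt_mul (by norm_num)]
        calc n < 10 ^ (m + 1) := hn
          _ = 10 ^ m * 10 := by ring
      have h1 := ih m (n / 10) hm1 hdiv
      have h2 : n % 10 < 10 := Nat.mod_lt _ (by norm_num)
      have hsq : n % 10 * (n % 10) ≤ 9 * 9 :=
        Nat.mul_le_mul (Nat.le_of_lt_succ h2) (Nat.le_of_lt_succ h2)
      omega

theorem sqsumF_le (a : Int) (h0 : 0 ≤ a) (h1 : a ≤ 2147483648) : sqsumF a ≤ 810 := by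
  unfold sqsumF
  have : ssdF (a.toNat + 1) a.toNat ≤ 81 * 10 :=
    ssdF_le (a.toNat + 1) 10 a.toNat (by norm_num) (by norm_num; omega)
  omega

theorem sqsumF_small (a : Int) (h0 : 0 ≤ a) (h1 : a ≤ 810) :
    0 ≤ sqsumF a ∧ sqsumF a ≤ 810 :=
  ⟨sqsumF_nonneg a, sqsumF_le a h0 (by omega)⟩

theorem loopA_eq_F (fuel : Nat) : ∀ (l : List Int) (a : Int), 0 ≤ a →
    loopA l a fuel = loopAF l a fuel := by
  induction fuel with
  | zero => intro l a _; rfl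
  | succ f ih =>
    intro l a ha
    simp only [loopA, loopAF, sqsum_eqF a ha]
    split
    · rfl
    · exact ih _ _ (sqsumF_nonneg a)

theorem loopB_eq_F (fuel : Nat) : ∀ (a mu : Int), 0 ≤ a →
    loopB a mu fuel = loopBF a mu fuel := by
  induction fuel with
  | zero => intro a mu _; rfl
  | succ f ih =>
    intro a mu ha
    simp only [loopB, loopBF, sqsum_eqF a ha]
    split
    · rfl
    · exact ih _ _ (sqsumF_nonneg a)

-- dropping a huge head element from A's list does not change the outcome: the head is never
-- counted again because all later sequence values stay ≤ 810
theorem loopAF_cons_big (fuel : Nat) : ∀ (x : Int) (l : List Int) (a : Int),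
    811 ≤ x → 0 ≤ a → a ≤ 810 →
    loopAF (x :: l) a fuel = 1 + loopAF l a fuel := by
  induction fuel with
  | zero => intro x l a _ _ _; simp [loopAF]; ring
  | succ f ih =>
    intro x l a hx ha0 ha1
    obtain ⟨hs0, hs1⟩ := sqsumF_small a ha0 ha1
    have hxne : (x == sqsumF a) = false := by
      rw [beq_eq_false_iff_ne]; intro h; omega
    simp only [loopAF, List.cons_append, PySem.List.count_eq, List.count_cons, hxne,
      Bool.false_eq_true, if_false, Nat.add_zero]
    split
    · simp; ring
    · exact ih x (l ++ [sqsumF a]) (sqsumF a) hx hs0 hs1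

theorem loopAF_step (l : List Int) (a : Int) (f : Nat) :
    loopAF l a (f+1) =
      (if PySem.List.count (l ++ [sqsumF a]) (sqsumF a) > 1 then ((l ++ [sqsumF a]).length : Int)
       else loopAF (l ++ [sqsumF a]) (sqsumF a) f) := rfl

theorem loopBF_step (a mu : Int) (f : Nat) :
    loopBF a mu (f+1) =
      (if PySem.Set.contains ATTR a then (a, mu) else loopBF (sqsumF a) (mu + 1) f) := rfl

theorem attr_not_contains (a : Int) (h : 811 ≤ a) :
    PySem.Set.contains ATTR a = false := by
  have hm : a ∉ (ATTR : List Int) := by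
    intro hm
    have : a = 0 ∨ a = 1 ∨ a = 4 ∨ a = 16 ∨ a = 37 ∨ a = 58 ∨ a = 89 ∨ a = 145 ∨
        a = 42 ∨ a = 20 := by
      simpa [ATTR, PySem.Set.ofList, PySem.Set.add] using hm
    omega
  simp only [PySem.Set.contains]
  exact Bool.eq_false_iff.mpr (fun hc => hm (List.contains_iff_mem.mp hc))

-- Nat-level mirrors of the two loops (kernel-fast; bridged to the Int mirrors below)
def ATTRN : List Nat := [0, 1, 4, 16, 37, 58, 89, 145, 42, 20]

def loopA3 (seen : List Nat) (a : Nat) : Nat → Nat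
  | 0 => seen.length
  | fuel+1 =>
    let a' := ssdF (a + 1) a
    if (a' :: seen).count a' > 1 then seen.length + 1
    else loopA3 (a' :: seen) a' fuel

def loopB3 (a : Nat) (mu : Nat) : Nat → Nat × Nat
  | 0 => (a, mu)
  | fuel+1 =>
    if ATTRN.contains a then (a, mu)
    else loopB3 (ssdF (a + 1) a) (mu + 1) fuel

theorem sqsumF_natCast (n : Nat) : sqsumF (n : Int) = (ssdF (n + 1) n : Int) := by
  simp [sqsumF]

theorem attr_bridge (n : Nat) :
    PySem.Set.contains ATTR (n : Int) = ATTRN.contains n := by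
  have hiff : ((n : Int) ∈ (ATTR : List Int)) ↔ n ∈ ATTRN := by
    simp [ATTR, ATTRN, PySem.Set.ofList, PySem.Set.add]
    omega
  cases hc : ATTRN.contains n with
  | true =>
    exact List.contains_iff_mem.mpr (hiff.mpr (List.contains_iff_mem.mp hc))
  | false =>
    refine Bool.eq_false_iff.mpr (fun h => ?_)
    have := hiff.mp (List.contains_iff_mem.mp h)
    rw [Bool.eq_false_iff] at hc
    exact hc (List.contains_iff_mem.mpr this)

theorem loopA_bridge (fuel : Nat) : ∀ (l : List Int) (lN : List Nat) (aN : Nat),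
    l.Perm (lN.map (fun n : Nat => (n : Int))) →
    loopAF l (aN : Int) fuel = (loopA3 lN aN fuel : Int) := by
  induction fuel with
  | zero =>
    intro l lN aN hp
    show (l.length : Int) = (lN.length : Int)
    rw [hp.length_eq, List.length_map]
  | succ f ih =>
    intro l lN aN hp
    have hperm : (l ++ [sqsumF (aN : Int)]).Perm
        ((ssdF (aN + 1) aN :: lN).map (fun n : Nat => (n : Int))) := by
      rw [sqsumF_natCast]
      exact (List.perm_append_singleton _ _).trans (hp.cons _)
    have hcnt : PySem.List.count (l ++ [sqsumF (aN : Int)]) (sqsumF (aN : Int))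
        = (ssdF (aN + 1) aN :: lN).count (ssdF (aN + 1) aN) := by
      rw [PySem.List.count_eq, hperm.count_eq, sqsumF_natCast]
      exact List.count_map_of_injective (ssdF (aN + 1) aN :: lN) (fun n : Nat => (n : Int))
        (fun a b h => by simpa using h) (ssdF (aN + 1) aN)
    simp only [loopAF, loopA3, hcnt]
    split
    · rw [hperm.length_eq]
      simp
    · rw [sqsumF_natCast]
      exact ih _ _ _ (by rw [← sqsumF_natCast]; exact hperm)

theorem loopB_bridge (fuel : Nat) : ∀ (aN muN : Nat),
    loopBF (aN : Int) (muN : Int) fuel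
      = (((loopB3 aN muN fuel).1 : Int), ((loopB3 aN muN fuel).2 : Int)) := by
  induction fuel with
  | zero => intro aN muN; rfl
  | succ f ih =>
    intro aN muN
    simp only [loopBF, loopB3, attr_bridge]
    split
    · rfl
    · rw [sqsumF_natCast, show ((muN : Int) + 1) = ((muN + 1 : Nat) : Int) by push_cast; ring]
      exact ih _ _

theorem out_pair (x y : Nat) :
    (let p := ((x : Int), (y : Int)); p.2 + (if p.1 = 0 ∨ p.1 = 1 then 1 else 8) + 1)
      = ((y + (if x = 0 ∨ x = 1 then 1 else 8) + 1 : Nat) : Int) := by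
  by_cases h : x = 0 ∨ x = 1
  · rw [show (let p := ((x : Int), (y : Int)); p.2 + (if p.1 = 0 ∨ p.1 = 1 then 1 else 8) + 1)
        = ((y : Int) + (if (x : Int) = 0 ∨ (x : Int) = 1 then 1 else 8) + 1) from rfl,
      if_pos (show (x : Int) = 0 ∨ (x : Int) = 1 by omega), if_pos h]
    push_cast; ring
  · rw [show (let p := ((x : Int), (y : Int)); p.2 + (if p.1 = 0 ∨ p.1 = 1 then 1 else 8) + 1)
        = ((y : Int) + (if (x : Int) = 0 ∨ (x : Int) = 1 then 1 else 8) + 1) from rfl,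
      if_neg (show ¬((x : Int) = 0 ∨ (x : Int) = 1) by omega), if_neg h]
    push_cast; ring

-- the two programs agree on every seed 0 ≤ n ≤ 810, both at the top level (fuel 64) and in the
-- peeled form used for huge seeds (fuel 63, one step and one list cell consumed) — kernel evaluation
set_option maxRecDepth 1000000 in
set_option maxHeartbeats 4000000 in
theorem tall_eq : ((List.range 811).all (fun n =>
    (loopA3 [n] n 64 ==
      (let p := loopB3 n 0 64; p.2 + (if p.1 = 0 ∨ p.1 = 1 then 1 else 8) + 1))
    && (loopA3 [n] n 63 + 1 ==
      (let p := loopB3 n 1 63; p.2 + (if p.1 = 0 ∨ p.1 = 1 then 1 else 8) + 1)))) = true := by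
  decide

theorem all_range_get {f : Nat → Bool} {N n : Nat}
    (h : (List.range N).all f = true) (hn : n < N) : f n = true := by
  rw [List.all_eq_true] at h
  exact h n (List.mem_range.mpr hn)

-- ===== VERDICT (by name: the statement is the Claim_ definition above) =====
theorem squareDigitsSequence_spec : Claim_equal_squareDigitsSequence := by
  intro a0 hdom hpre
  unfold Spec_squareDigitsSequence
  have hpre' : 0 ≤ a0 := hpre
  have hdom' : a0 ≤ 2147483648 := by
    unfold Dom_squareDigitsSequence pvDomInt at hdom
    simpa using (of_decide_eq_true hdom).2
  have hA0 : squareDigitsSequence a0 = loopAF [a0] a0 64 := loopA_eq_F 64 [a0] a0 hpre'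
  have hB0 : squareDigitsSequence_alt a0 =
      (let p := loopBF a0 0 64; p.2 + (if p.1 = 0 ∨ p.1 = 1 then 1 else 8) + 1) := by
    unfold squareDigitsSequence_alt
    rw [loopB_eq_F 64 a0 0 hpre']
  by_cases hs : a0 ≤ 810
  · -- small seed: direct kernel check via the Nat mirrors
    set n := a0.toNat with hn
    have ha : (n : Int) = a0 := by omega
    have hkey := all_range_get tall_eq (show n < 811 by omega)
    rw [Bool.and_eq_true, beq_iff_eq, beq_iff_eq] at hkey
    have hLB := loopB_bridge 64 n 0
    push_cast at hLB
    rw [hA0, hB0, ← ha, loopA_bridge 64 [(n : Int)] [n] n (by simp), hLB, out_pair]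
    exact congrArg _ hkey.1
  · -- huge seed: peel one step off both programs, then kernel check on the small successor
    have hb : 810 < a0 := by omega
    have hs0 : 0 ≤ sqsumF a0 := sqsumF_nonneg a0
    have hs1 : sqsumF a0 ≤ 810 := sqsumF_le a0 hpre' hdom'
    have hxne : (a0 == sqsumF a0) = false := by
      rw [beq_eq_false_iff_ne]; intro h; omega
    -- A side
    have hA : loopAF [a0] a0 64 = 1 + loopAF [sqsumF a0] (sqsumF a0) 63 := by
      rw [show (64:Nat) = 63+1 from rfl, loopAF_step]
      have hcnt : PySem.List.count ([a0] ++ [sqsumF a0]) (sqsumF a0) = 1 := by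
        simp [PySem.List.count_eq, List.count_cons, hxne]
      rw [hcnt, if_neg (by omega)]
      exact loopAF_cons_big 63 a0 [sqsumF a0] (sqsumF a0) (by omega) hs0 hs1
    -- B side
    have hB : (let p := loopBF a0 0 64; p.2 + (if p.1 = 0 ∨ p.1 = 1 then 1 else 8) + 1) =
        (let p := loopBF (sqsumF a0) 1 63;
         p.2 + (if p.1 = 0 ∨ p.1 = 1 then 1 else 8) + 1) := by
      rw [show (64:Nat) = 63+1 from rfl, loopBF_step, attr_not_contains a0 (by omega)]
      simp
    set m := (sqsumF a0).toNat with hm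
    have hmc : (m : Int) = sqsumF a0 := by omega
    have hkey := all_range_get tall_eq (show m < 811 by omega)
    rw [Bool.and_eq_true, beq_iff_eq, beq_iff_eq] at hkey
    have hLB := loopB_bridge 63 m 1
    push_cast at hLB
    rw [hA0, hB0, hA, hB, ← hmc, loopA_bridge 63 [(m : Int)] [m] m (by simp), hLB, out_pair,
      ← hkey.2]
    push_cast; ring
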